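-- pv_equiv track=rewrite | github.com/nguyenthanhvuh/aca-generalize | miscs.py | getTermsFixedCoefs
-- ===== SOURCE A (Python) =====
-- import itertools
--
-- def getTermsFixedCoefs(ss, k):
--     """
--     >>> assert len(Miscs.getTermsFixedCoefs(range(3), 2)) == 18
--     >>> assert len(Miscs.getTermsFixedCoefs(['x','y','z'], 4)) == 26
--     >>> sorted(Miscs.getTermsFixedCoefs(['x','y'], 2))
--     [((-1, 'x'),), ((-1, 'x'), (-1, 'y')), ((-1, 'x'), (1, 'y')), ((-1, 'y'),), ((1, 'x'),), ((1, 'x'), (-1, 'y')), ((1, 'x'), (1, 'y')), ((1, 'y'),)]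
--     """
--
--     if len(ss) < k:
--         k = len(ss)
--     rs = []
--
--     #[(0, -1), (0, 1), (-1, 0), (-1, -1), (-1, 1), (1, 0), (1, -1), (1, 1)]
--     css = [cs for cs in itertools.product(*([[0, -1, 1]] * k))
--            if not all(c == 0 for c in cs)]
--
--     for ss_ in itertools.combinations(ss, k): # [(0,1), (0,2), (1,2)]
--         r = [tuple((c,s) for c,s in zip(cs,ss_) if c)
--              for cs in css] #-1 * a
--         rs.extend(r)
--
--     return set(rs)
-- ===== SOURCE B (Python) =====
-- def getTermsFixedCoefs(ss, k):
--     k = min(k, len(ss))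
--
--     def signed(vs):
--         # all signed sub-terms of vs, in coefficient order [0, -1, 1] per
--         # position (first position varies slowest); the empty term comes first
--         if not vs:
--             return [()]
--         rest = signed(vs[1:])
--         v = vs[0]
--         return rest + [((-1, v),) + t for t in rest] + [((1, v),) + t for t in rest]
--
--     def combos(vs, j):
--         if j <= 0:
--             return [()]
--         if not vs:
--             return []
--         return [(vs[0],) + c for c in combos(vs[1:], j - 1)] + combos(vs[1:], j)
--
--     return set(t for c in combos(tuple(ss), k) for t in signed(c)[1:])
-- ===== Notes on version B (the rewrite author's own statement) =====
-- stated objective: alternative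
-- what changed: B replaces A's itertools.product coefficient vectors plus per-pattern zip/filter per combination by a recursive generator that builds the signed sub-terms directly, and a recursive combinations helper; it trades itertools machinery for structural recursion.
import Mathlib
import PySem

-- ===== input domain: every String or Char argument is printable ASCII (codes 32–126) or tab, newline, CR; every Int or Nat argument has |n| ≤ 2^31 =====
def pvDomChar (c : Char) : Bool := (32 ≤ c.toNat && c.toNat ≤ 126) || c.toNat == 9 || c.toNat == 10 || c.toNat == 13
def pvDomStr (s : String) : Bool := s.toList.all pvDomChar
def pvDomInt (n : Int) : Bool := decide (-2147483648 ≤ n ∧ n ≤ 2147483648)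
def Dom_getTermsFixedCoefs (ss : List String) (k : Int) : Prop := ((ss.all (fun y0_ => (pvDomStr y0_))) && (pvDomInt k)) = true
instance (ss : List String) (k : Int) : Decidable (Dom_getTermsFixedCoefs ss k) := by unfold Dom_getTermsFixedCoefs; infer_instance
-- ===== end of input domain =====

-- B replaces A's coefficient-vector product + per-pattern zip/filter by a direct recursive
-- generator of the signed sub-terms (and a recursive combinations helper): an alternative,
-- structurally different enumeration of the same terms in the same order.

-- ===== PORT A =====
-- itertools.product(*([[0,-1,1]]*k)): first coordinate varies slowest
def pvProd3 : Nat → List (List Int)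
  | 0 => [[]]
  | n + 1 => ([0, -1, 1] : List Int).flatMap (fun c => (pvProd3 n).map (c :: ·))

-- tuple((c,s) for c,s in zip(cs, ss_) if c)
def pvTerm (cs : List Int) (ss_ : List String) : List (Int × String) :=
  (cs.zip ss_).filter (fun p => p.1 != 0)

def getTermsFixedCoefs (ss : List String) (k : Int) : List (List (Int × String)) :=
  let k' : Int := if (ss.length : Int) < k then (ss.length : Int) else k
  let css := (pvProd3 k'.toNat).filter (fun cs => !(cs.all (· == 0)))
  let rs := (PySem.List.combinations ss k'.toNat).foldl
    (fun rs ss_ => rs ++ css.map (fun cs => pvTerm cs ss_)) []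
  PySem.Set.ofList rs

-- ===== PORT B =====
-- signed(vs): all signed sub-terms of vs, empty term first
def pvSigned : List String → List (List (Int × String))
  | [] => [[]]
  | v :: vs =>
    let rest := pvSigned vs
    rest ++ rest.map ((((-1 : Int), v)) :: ·) ++ rest.map ((((1 : Int), v)) :: ·)

-- combos(vs, j)
def pvCombos : List String → Int → List (List String)
  | [], j => if j ≤ 0 then [[]] else []
  | v :: tl, j => if j ≤ 0 then [[]] else ((pvCombos tl (j - 1)).map (v :: ·)) ++ pvCombos tl j

def getTermsFixedCoefs_alt (ss : List String) (k : Int) : List (List (Int × String)) :=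
  let j := min k (ss.length : Int)
  PySem.Set.ofList ((pvCombos ss j).flatMap (fun c => (pvSigned c).drop 1))

-- ===== PRECONDITION & SPEC =====
-- Pre_ excludes k < 0, where Python A raises ValueError (itertools.combinations needs r ≥ 0).
def Pre_getTermsFixedCoefs (ss : List String) (k : Int) : Prop := 0 ≤ k
instance (ss : List String) (k : Int) : Decidable (Pre_getTermsFixedCoefs ss k) := by
  unfold Pre_getTermsFixedCoefs; infer_instance

def pvWitness_getTermsFixedCoefs : List String × Int := (["x", "y"], 2)

def Spec_getTermsFixedCoefs (ss : List String) (k : Int) (out : List (List (Int × String))) : Prop := out = getTermsFixedCoefs_alt ss k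
instance (ss : List String) (k : Int) (out : List (List (Int × String))) : Decidable (Spec_getTermsFixedCoefs ss k out) := by unfold Spec_getTermsFixedCoefs; infer_instance

-- ===== CLAIM (what is proved, stated in full; the proofs are below) =====
def Claim_equal_getTermsFixedCoefs : Prop := ∀ (ss : List String) (k : Int), Dom_getTermsFixedCoefs ss k → Pre_getTermsFixedCoefs ss k → Spec_getTermsFixedCoefs ss k (getTermsFixedCoefs ss k)

-- ===== LEMMAS AND PROOFS =====

-- B's combos is itertools.combinations
theorem pvCombos_eq_combinations (vs : List String) (j : Int) :
    pvCombos vs j = PySem.List.combinations vs j.toNat := by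
  induction vs generalizing j with
  | nil =>
    by_cases h : j ≤ 0
    · simp [pvCombos, h, (show j.toNat = 0 by omega), PySem.List.combinations_zero]
    · obtain ⟨m, hm⟩ : ∃ m, j.toNat = m + 1 := ⟨j.toNat - 1, by omega⟩
      simp [pvCombos, h, hm, PySem.List.combinations_nil_succ]
  | cons v tl ih =>
    by_cases h : j ≤ 0
    · simp [pvCombos, h, (show j.toNat = 0 by omega), PySem.List.combinations_zero]
    · obtain ⟨m, hm⟩ : ∃ m, j.toNat = m + 1 := ⟨j.toNat - 1, by omega⟩
      have h1 : (j - 1).toNat = m := by omega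
      simp [pvCombos, h, hm, PySem.List.combinations_cons_succ, ih, h1]

-- structure of the coefficient product: all-zero vector first, every later vector has a nonzero
theorem pvProd3_struct (n : Nat) :
    ∃ t, pvProd3 n = List.replicate n 0 :: t ∧ ∀ cs ∈ t, (cs.all (· == 0)) = false := by
  induction n with
  | zero => exact ⟨[], rfl, by simp⟩
  | succ n ih =>
    obtain ⟨t, hP, ht⟩ := ih
    refine ⟨t.map ((0 : Int) :: ·) ++ ((pvProd3 n).map (((-1 : Int)) :: ·) ++ (pvProd3 n).map (((1 : Int)) :: ·)), ?_, ?_⟩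
    · rw [pvProd3]
      simp only [List.flatMap_cons, List.flatMap_nil, List.append_nil]
      rw [hP]
      simp [List.replicate_succ]
    · intro cs hcs
      rcases List.mem_append.1 hcs with h | h
      · obtain ⟨cs', hcs', rfl⟩ := List.mem_map.1 h
        simp [ht cs' hcs']
      · rcases List.mem_append.1 h with h' | h' <;>
        · obtain ⟨cs', hcs', rfl⟩ := List.mem_map.1 h'
          simp

-- filtering out the all-zero vector = dropping the head
theorem filter_pvProd3 (n : Nat) :
    (pvProd3 n).filter (fun cs => !(cs.all (· == 0))) = (pvProd3 n).tail := by
  obtain ⟨t, hP, ht⟩ := pvProd3_struct n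
  rw [hP, List.filter_cons_of_neg (by simp), List.tail_cons]
  exact List.filter_eq_self.2 (fun cs hcs => by simp [ht cs hcs])

theorem pvTerm_cons (c : Int) (cs : List Int) (v : String) (vs : List String) :
    pvTerm (c :: cs) (v :: vs) = if c != 0 then (c, v) :: pvTerm cs vs else pvTerm cs vs := by
  simp only [pvTerm, List.zip_cons_cons, List.filter_cons]

-- B's signed generator = A's term map over the full coefficient product
theorem pvSigned_eq (vs : List String) :
    pvSigned vs = (pvProd3 vs.length).map (fun cs => pvTerm cs vs) := by
  induction vs with
  | nil => simp [pvSigned, pvProd3, pvTerm]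
  | cons v vs ih =>
    have h0 : List.map ((fun cs => pvTerm cs (v :: vs)) ∘ fun x => (0 : Int) :: x) (pvProd3 vs.length)
        = List.map (fun cs => pvTerm cs vs) (pvProd3 vs.length) :=
      List.map_congr_left (fun cs _ => by simp [Function.comp, pvTerm_cons])
    have hneg : List.map ((fun cs => pvTerm cs (v :: vs)) ∘ fun x => (-1 : Int) :: x) (pvProd3 vs.length)
        = List.map ((((-1 : Int), v)) :: ·) (List.map (fun cs => pvTerm cs vs) (pvProd3 vs.length)) := by
      rw [List.map_map]
      exact List.map_congr_left (fun cs _ => by simp [Function.comp, pvTerm_cons])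
    have hpos : List.map ((fun cs => pvTerm cs (v :: vs)) ∘ fun x => (1 : Int) :: x) (pvProd3 vs.length)
        = List.map ((((1 : Int), v)) :: ·) (List.map (fun cs => pvTerm cs vs) (pvProd3 vs.length)) := by
      rw [List.map_map]
      exact List.map_congr_left (fun cs _ => by simp [Function.comp, pvTerm_cons])
    rw [pvSigned, List.length_cons, pvProd3]
    simp only [List.flatMap_cons, List.flatMap_nil, List.append_nil, List.map_append,
      List.map_map]
    rw [h0, hneg, hpos, ih, List.append_assoc]

theorem flatMap_congr_len {α : Type} (l : List (List String))
    (f g : List String → List α) (h : ∀ c ∈ l, f c = g c) :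
    l.flatMap f = l.flatMap g := by
  induction l with
  | nil => rfl
  | cons c l ih =>
    simp only [List.flatMap_cons, h c (List.mem_cons_self ..),
      ih (fun c hc => h c (List.mem_cons_of_mem _ hc))]

theorem rs_eq (ss : List String) (n : Nat) :
    (PySem.List.combinations ss n).foldl
      (fun rs ss_ => rs ++ ((pvProd3 n).filter (fun cs => !(cs.all (· == 0)))).map (fun cs => pvTerm cs ss_)) []
    = (PySem.List.combinations ss n).flatMap (fun c => (pvSigned c).drop 1) := by
  rw [PySem.List.foldl_append_eq_flatMap, List.nil_append]
  apply flatMap_congr_len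
  intro c hc
  have hlen : c.length = n := PySem.List.length_of_mem_combinations hc
  rw [filter_pvProd3, List.map_tail, ← hlen, ← pvSigned_eq, List.drop_one]

-- ===== VERDICT (by name: the statement is the Claim_ definition above) =====
theorem getTermsFixedCoefs_spec : Claim_equal_getTermsFixedCoefs := by
  intro ss k _ hk
  unfold Spec_getTermsFixedCoefs getTermsFixedCoefs getTermsFixedCoefs_alt
  dsimp only
  have hmin : (if (ss.length : Int) < k then (ss.length : Int) else k) = min k (ss.length : Int) := by
    rcases lt_or_ge (ss.length : Int) k with h | h <;> simp [h] <;> omega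
  rw [hmin, pvCombos_eq_combinations, rs_eq]
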